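-- pv_equiv track=rewrite | github.com/bmountjoy/LMTools | TCD_Interface.py | rangeCheck
-- ===== SOURCE A (Python) =====
-- def rangeCheck(run_h1, h1_min, h1_max, run_h2, h2_min, h2_max, run_h3, h3_min, h3_max, run_h9, h9_min, h9_max, run_h11, h11_min, h11_max):
--
-- 	heights = []
--
-- 	#singles
-- 	if run_h1 :
-- 		heights.append(h1_min)
-- 		heights.append(h1_max)
--
-- 	if run_h2 :
-- 		heights.append(h2_min)
-- 		heights.append(h2_max)
--
-- 	if run_h3 :
-- 		heights.append(h3_min)
-- 		heights.append(h3_max)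
--
-- 	if run_h9 :
-- 		heights.append(h9_min)
-- 		heights.append(h9_max)
--
-- 	if run_h11 :
-- 		heights.append(h11_min)
-- 		heights.append(h11_max)
--
-- 	i = 0
-- 	while i < len(heights):
-- 		if heights[i] > heights[i+1]:
-- 			return 0
-- 		i = i + 2
--
-- 	return 1
-- ===== SOURCE B (Python) =====
-- def rangeCheck(run_h1, h1_min, h1_max, run_h2, h2_min, h2_max, run_h3, h3_min, h3_max, run_h9, h9_min, h9_max, run_h11, h11_min, h11_max):
--     # Branchless arithmetic: each factor is 0 exactly when that height is enabled
--     # and its min exceeds its max; the product is 1 iff no enabled pair is invalid.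
--     return ((1 - int(run_h1) * int(h1_min > h1_max))
--           * (1 - int(run_h2) * int(h2_min > h2_max))
--           * (1 - int(run_h3) * int(h3_min > h3_max))
--           * (1 - int(run_h9) * int(h9_min > h9_max))
--           * (1 - int(run_h11) * int(h11_min > h11_max)))
-- ===== Notes on version B (the rewrite author's own statement) =====
-- stated objective: alternative
-- what changed: Replaces A's list-building phase plus index-stepping scan with early return by a branchless closed-form arithmetic product of five 0/1 indicator factors (no list, no loop, no early exit).
import Mathlib
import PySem

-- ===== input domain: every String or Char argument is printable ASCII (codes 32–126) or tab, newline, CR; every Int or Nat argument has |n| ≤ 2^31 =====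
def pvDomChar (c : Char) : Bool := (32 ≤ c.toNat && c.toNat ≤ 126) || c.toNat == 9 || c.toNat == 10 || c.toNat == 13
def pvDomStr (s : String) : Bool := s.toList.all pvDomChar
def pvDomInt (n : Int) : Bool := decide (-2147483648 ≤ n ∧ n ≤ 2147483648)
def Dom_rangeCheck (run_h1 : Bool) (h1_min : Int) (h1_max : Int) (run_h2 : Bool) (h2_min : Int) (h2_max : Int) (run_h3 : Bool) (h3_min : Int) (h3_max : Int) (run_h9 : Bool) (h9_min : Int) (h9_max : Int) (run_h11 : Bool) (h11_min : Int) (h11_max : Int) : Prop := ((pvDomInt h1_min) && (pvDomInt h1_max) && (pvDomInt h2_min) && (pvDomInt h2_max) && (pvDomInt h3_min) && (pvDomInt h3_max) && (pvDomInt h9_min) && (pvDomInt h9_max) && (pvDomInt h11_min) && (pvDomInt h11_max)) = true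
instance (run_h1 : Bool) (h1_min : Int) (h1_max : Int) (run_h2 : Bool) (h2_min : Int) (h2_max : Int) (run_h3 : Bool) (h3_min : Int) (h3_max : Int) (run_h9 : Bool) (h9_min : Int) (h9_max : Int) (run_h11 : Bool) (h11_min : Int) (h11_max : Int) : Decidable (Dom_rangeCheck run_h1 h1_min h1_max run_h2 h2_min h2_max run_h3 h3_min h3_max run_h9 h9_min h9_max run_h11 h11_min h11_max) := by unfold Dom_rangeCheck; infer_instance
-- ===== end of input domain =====

-- ===== PORT A =====
-- Port A: builds the heights list by conditional appends, then scans it two at a time (the while loop).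
def scanPairs : List Int → Int
  | a :: b :: rest => if a > b then 0 else scanPairs rest
  | _ => 1

def rangeCheck (run_h1 : Bool) (h1_min : Int) (h1_max : Int) (run_h2 : Bool) (h2_min : Int) (h2_max : Int) (run_h3 : Bool) (h3_min : Int) (h3_max : Int) (run_h9 : Bool) (h9_min : Int) (h9_max : Int) (run_h11 : Bool) (h11_min : Int) (h11_max : Int) : Int :=
  let heights : List Int := []
  let heights := if run_h1 then heights ++ [h1_min, h1_max] else heights
  let heights := if run_h2 then heights ++ [h2_min, h2_max] else heights
  let heights := if run_h3 then heights ++ [h3_min, h3_max] else heights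
  let heights := if run_h9 then heights ++ [h9_min, h9_max] else heights
  let heights := if run_h11 then heights ++ [h11_min, h11_max] else heights
  scanPairs heights

-- ===== PORT B =====
-- Port B: branchless closed-form product of five 0/1 indicator factors (no list, no loop).
def rangeCheck_alt (run_h1 : Bool) (h1_min : Int) (h1_max : Int) (run_h2 : Bool) (h2_min : Int) (h2_max : Int) (run_h3 : Bool) (h3_min : Int) (h3_max : Int) (run_h9 : Bool) (h9_min : Int) (h9_max : Int) (run_h11 : Bool) (h11_min : Int) (h11_max : Int) : Int :=
  (1 - (if run_h1 then (1:Int) else 0) * (if h1_min > h1_max then (1:Int) else 0))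
  * (1 - (if run_h2 then (1:Int) else 0) * (if h2_min > h2_max then (1:Int) else 0))
  * (1 - (if run_h3 then (1:Int) else 0) * (if h3_min > h3_max then (1:Int) else 0))
  * (1 - (if run_h9 then (1:Int) else 0) * (if h9_min > h9_max then (1:Int) else 0))
  * (1 - (if run_h11 then (1:Int) else 0) * (if h11_min > h11_max then (1:Int) else 0))

-- ===== PRECONDITION & SPEC =====
def Spec_rangeCheck (run_h1 : Bool) (h1_min : Int) (h1_max : Int) (run_h2 : Bool) (h2_min : Int) (h2_max : Int) (run_h3 : Bool) (h3_min : Int) (h3_max : Int) (run_h9 : Bool) (h9_min : Int) (h9_max : Int) (run_h11 : Bool) (h11_min : Int) (h11_max : Int) (out : Int) : Prop := out = rangeCheck_alt run_h1 h1_min h1_max run_h2 h2_min h2_max run_h3 h3_min h3_max run_h9 h9_min h9_max run_h11 h11_min h11_max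
instance (run_h1 : Bool) (h1_min : Int) (h1_max : Int) (run_h2 : Bool) (h2_min : Int) (h2_max : Int) (run_h3 : Bool) (h3_min : Int) (h3_max : Int) (run_h9 : Bool) (h9_min : Int) (h9_max : Int) (run_h11 : Bool) (h11_min : Int) (h11_max : Int) (out : Int) : Decidable (Spec_rangeCheck run_h1 h1_min h1_max run_h2 h2_min h2_max run_h3 h3_min h3_max run_h9 h9_min h9_max run_h11 h11_min h11_max out) := by unfold Spec_rangeCheck; infer_instance

-- ===== CLAIM =====
def Claim_equal_rangeCheck : Prop := ∀ (run_h1 : Bool) (h1_min : Int) (h1_max : Int) (run_h2 : Bool) (h2_min : Int) (h2_max : Int) (run_h3 : Bool) (h3_min : Int) (h3_max : Int) (run_h9 : Bool) (h9_min : Int) (h9_max : Int) (run_h11 : Bool) (h11_min : Int) (h11_max : Int), Dom_rangeCheck run_h1 h1_min h1_max run_h2 h2_min h2_max run_h3 h3_min h3_max run_h9 h9_min h9_max run_h11 h11_min h11_max → Spec_rangeCheck run_h1 h1_min h1_max run_h2 h2_min h2_max run_h3 h3_min h3_max run_h9 h9_min h9_max run_h11 h11_min h11_max (rangeCheck run_h1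 h1_min h1_max run_h2 h2_min h2_max run_h3 h3_min h3_max run_h9 h9_min h9_max run_h11 h11_min h11_max)

-- ===== LEMMAS AND PROOFS =====

-- ===== VERDICT =====
theorem rangeCheck_spec : Claim_equal_rangeCheck := by
  intro r1 a1 b1 r2 a2 b2 r3 a3 b3 r9 a9 b9 r11 a11 b11 _
  unfold Spec_rangeCheck rangeCheck rangeCheck_alt
  cases r1 <;> cases r2 <;> cases r3 <;> cases r9 <;> cases r11 <;>
    simp [scanPairs] <;> split_ifs <;> simp_all <;> omega
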